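-- pv_equiv track=rewrite | github.com/shatianming5/open-problem-atlas | verifiers/checkers/math/erdos_sos_checker.py | _is_subgraph
-- ===== SOURCE A (Python) =====
-- def _is_subgraph(tree_edges: set, graph_adj: dict, n: int, k: int) -> bool:
--     """Check if tree (on k vertices) is a subgraph of graph (on n vertices).
--
--     Uses backtracking to find an injective mapping.
--     """
--     if k > n:
--         return False
--     if not tree_edges:
--         return True
--
--     # Build tree adjacency
--     tree_adj = {i: [] for i in range(k)}
--     for u, v in tree_edges:
--         tree_adj[u].append(v)
--         tree_adj[v].append(u)
--
--     # Backtracking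
--     mapping = [-1] * k
--     used = [False] * n
--
--     def backtrack(idx):
--         if idx == k:
--             return True
--
--         for v in range(n):
--             if used[v]:
--                 continue
--             # Check all edges from idx to already-mapped vertices
--             valid = True
--             for nb in tree_adj[idx]:
--                 if mapping[nb] != -1:
--                     if mapping[nb] not in graph_adj.get(v, set()):
--                         valid = False
--                         break
--             if valid:
--                 mapping[idx] = v
--                 used[v] = True
--                 if backtrack(idx + 1):
--                     return True
--                 mapping[idx] = -1
--                 used[v] = False
--
--         return False
--
--     return backtrack(0)
-- ===== SOURCE B (Python) =====
-- def _is_subgraph(tree_edges: set, graph_adj: dict, n: int, k: int) -> bool: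
--     """Iterative re-implementation: same pruning, explicit per-level
--     candidate array instead of recursion."""
--     if k > n:
--         return False
--     if not tree_edges:
--         return True
--
--     tree_adj = {i: [] for i in range(k)}
--     for u, v in tree_edges:
--         tree_adj[u].append(v)
--         tree_adj[v].append(u)
--
--     mapping = [-1] * k
--     used = [False] * n
--     pos = [0] * k  # next candidate vertex to try at each level
--     idx = 0
--     while idx >= 0:
--         if idx == k:
--             return True
--         v = pos[idx]
--         if v >= n:
--             # this level is exhausted: reset it and back up one level
--             pos[idx] = 0
--             idx -= 1
--             if idx >= 0:
--                 w = mapping[idx]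
--                 mapping[idx] = -1
--                 used[w] = False
--             continue
--         pos[idx] = v + 1
--         if used[v]:
--             continue
--         if all(mapping[nb] == -1 or mapping[nb] in graph_adj.get(v, set())
--                for nb in tree_adj[idx]):
--             mapping[idx] = v
--             used[v] = True
--             idx += 1
--     return False
-- ===== Notes on version B (the rewrite author's own statement) =====
-- stated objective: alternative
-- what changed: A's recursive backtracking (nested closure, recursion on the tree index) is replaced by an iterative while-loop search driven by an explicit per-level next-candidate array, with the same pruning test; no recursion remains.
import Mathlib
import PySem

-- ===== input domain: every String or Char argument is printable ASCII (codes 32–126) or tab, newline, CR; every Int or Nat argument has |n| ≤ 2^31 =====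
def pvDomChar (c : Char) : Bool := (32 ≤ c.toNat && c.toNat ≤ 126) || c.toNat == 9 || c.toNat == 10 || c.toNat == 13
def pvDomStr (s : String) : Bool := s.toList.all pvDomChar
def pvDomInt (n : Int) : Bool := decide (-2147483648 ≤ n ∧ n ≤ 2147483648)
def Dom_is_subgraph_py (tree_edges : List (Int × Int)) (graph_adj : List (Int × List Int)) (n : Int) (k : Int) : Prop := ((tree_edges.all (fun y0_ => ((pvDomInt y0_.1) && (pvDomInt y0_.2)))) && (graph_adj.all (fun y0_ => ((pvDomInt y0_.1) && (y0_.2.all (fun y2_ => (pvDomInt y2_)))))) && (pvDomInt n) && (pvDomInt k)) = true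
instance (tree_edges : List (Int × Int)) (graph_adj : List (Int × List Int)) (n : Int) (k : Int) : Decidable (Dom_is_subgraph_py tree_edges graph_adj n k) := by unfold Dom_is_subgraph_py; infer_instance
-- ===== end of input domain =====

-- B replaces A's recursive backtracking by an iterative search loop driven by a
-- per-level next-candidate array (same pruning, explicit control); objective: alternative.

-- ===== PORT A =====
-- graph_adj.get(v, set())  (first-match association-list lookup, as a Python dict)
def pvAdjGet (gadj : List (Int × List Int)) (v : Int) : List Int :=
  (PySem.Dict.mk gadj).getD v []

-- tree_adj = {i: [] for i in range(k)}; for u, v in tree_edges: tree_adj[u].append(v); tree_adj[v].append(u)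
-- (Dict.modify with default [] is exact here because under Pre_ every endpoint is already a key)
def pvBuildTreeAdj (tree_edges : List (Int × Int)) (k : Int) : PySem.Dict Int (List Int) :=
  tree_edges.foldl
    (fun d uv => (d.modify uv.1 [] (· ++ [uv.2])).modify uv.2 [] (· ++ [uv.1]))
    ((PySem.List.pyRange 0 k 1).foldl (fun d i => d.insert i []) PySem.Dict.empty)

-- A's inner validity loop (with break): for nb in tree_adj[idx]: …
-- (mapping[nb] is in range under Pre_, so pyGetD is exact)
def pvCheckA (gadj : List (Int × List Int)) (m : List Int) (v : Int) : List Int → Bool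
  | [] => true
  | nb :: rest =>
    let mnb := PySem.List.pyGetD m nb 0
    if mnb ≠ -1 then
      if (pvAdjGet gadj v).contains mnb then pvCheckA gadj m v rest else false
    else pvCheckA gadj m v rest

-- the 'for v in range(n)' loop of backtrack: v counts up, the counter (the number of
-- candidates left, n - v) makes the recursion structural; 'bt' is the recursive call
-- into backtrack(idx + 1)
def pvScanGo (gadj : List (Int × List Int)) (nbs : List Int) (n : Int)
    (bt : List Int → List Bool → Bool) (idx : Int) :
    Nat → Int → List Int → List Bool → Bool
  | 0, _, _, _ => false
  | c + 1, v, m, used =>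
    if n ≤ v then false
    else if PySem.List.pyGetD used v false then pvScanGo gadj nbs n bt idx c (v + 1) m used
    else if pvCheckA gadj m v nbs then
      if bt (PySem.List.pySetD m idx v) (PySem.List.pySetD used v true) then true
      else pvScanGo gadj nbs n bt idx c (v + 1) m used
    else pvScanGo gadj nbs n bt idx c (v + 1) m used

-- backtrack(idx); fuel = k - idx on every reachable call, so the 0-branch is never taken
def pvBtA (tadj : PySem.Dict Int (List Int)) (gadj : List (Int × List Int)) (n k : Int) :
    Nat → Int → List Int → List Bool → Bool
  | 0, idx, _, _ => if idx == k then true else false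
  | f + 1, idx, m, used =>
    if idx == k then true
    else pvScanGo gadj (tadj.getD idx []) n
      (fun m' used' => pvBtA tadj gadj n k f (idx + 1) m' used') idx n.toNat 0 m used

def is_subgraph_py (tree_edges : List (Int × Int)) (graph_adj : List (Int × List Int)) (n : Int) (k : Int) : Bool :=
  if k > n then false
  else if tree_edges.isEmpty then true
  else
    pvBtA (pvBuildTreeAdj tree_edges k) graph_adj n k k.toNat 0
      (List.replicate k.toNat (-1)) (List.replicate n.toNat false)

-- ===== PORT B =====
-- B's validity test: all(mapping[nb] == -1 or mapping[nb] in graph_adj.get(v, set()) for nb in tree_adj[idx])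
def pvValidB (gadj : List (Int × List Int)) (m : List Int) (v : Int) (nbs : List Int) : Bool :=
  nbs.all (fun nb => PySem.List.pyGetD m nb 0 == -1 || (pvAdjGet gadj v).contains (PySem.List.pyGetD m nb 0))

-- the while loop; fuel only makes the recursion structural (it never runs out: see the proofs)
def pvLoopB (tadj : PySem.Dict Int (List Int)) (gadj : List (Int × List Int)) (n k : Int) :
    Nat → Int → List Int → List Bool → List Int → Bool
  | 0, _, _, _, _ => false
  | f + 1, idx, m, used, pos =>
    if idx < 0 then false
    else if idx == k then true
    else
      let v := PySem.List.pyGetD pos idx 0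
      if n ≤ v then
        let pos' := PySem.List.pySetD pos idx 0
        if idx - 1 < 0 then pvLoopB tadj gadj n k f (idx - 1) m used pos'
        else
          let w := PySem.List.pyGetD m (idx - 1) 0
          pvLoopB tadj gadj n k f (idx - 1) (PySem.List.pySetD m (idx - 1) (-1))
            (PySem.List.pySetD used w false) pos'
      else
        let pos' := PySem.List.pySetD pos idx (v + 1)
        if PySem.List.pyGetD used v false then pvLoopB tadj gadj n k f idx m used pos'
        else if pvValidB gadj m v (tadj.getD idx []) then
          pvLoopB tadj gadj n k f (idx + 1) (PySem.List.pySetD m idx v)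
            (PySem.List.pySetD used v true) pos'
        else pvLoopB tadj gadj n k f idx m used pos'

def is_subgraph_py_alt (tree_edges : List (Int × Int)) (graph_adj : List (Int × List Int)) (n : Int) (k : Int) : Bool :=
  if k > n then false
  else if tree_edges.isEmpty then true
  else
    pvLoopB (pvBuildTreeAdj tree_edges k) graph_adj n k ((n.toNat + 3) ^ (k.toNat + 2)) 0
      (List.replicate k.toNat (-1)) (List.replicate n.toNat false) (List.replicate k.toNat 0)

-- ===== PRECONDITION & SPEC =====
-- Pre_ excludes exactly the inputs where A raises KeyError: a nonempty edge set reaching the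
-- backtracking phase (k ≤ n) with some edge endpoint outside range(k).
def Pre_is_subgraph_py (tree_edges : List (Int × Int)) (graph_adj : List (Int × List Int)) (n : Int) (k : Int) : Prop :=
  (k ≤ n ∧ tree_edges ≠ []) → ∀ p ∈ tree_edges, 0 ≤ p.1 ∧ p.1 < k ∧ 0 ≤ p.2 ∧ p.2 < k
instance (tree_edges : List (Int × Int)) (graph_adj : List (Int × List Int)) (n : Int) (k : Int) : Decidable (Pre_is_subgraph_py tree_edges graph_adj n k) := by unfold Pre_is_subgraph_py; infer_instance

def pvWitness_is_subgraph_py : (List (Int × Int)) × (List (Int × List Int)) × Int × Int :=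
  ([(0, 1)], [(0, [1]), (1, [0])], 2, 2)

def Spec_is_subgraph_py (tree_edges : List (Int × Int)) (graph_adj : List (Int × List Int)) (n : Int) (k : Int) (out : Bool) : Prop := out = is_subgraph_py_alt tree_edges graph_adj n k
instance (tree_edges : List (Int × Int)) (graph_adj : List (Int × List Int)) (n : Int) (k : Int) (out : Bool) : Decidable (Spec_is_subgraph_py tree_edges graph_adj n k out) := by unfold Spec_is_subgraph_py; infer_instance

-- ===== CLAIM (what is proved, stated in full; the proofs are below) =====
def Claim_equal_is_subgraph_py : Prop := ∀ (tree_edges : List (Int × Int)) (graph_adj : List (Int × List Int)) (n : Int) (k : Int), Dom_is_subgraph_py tree_edges graph_adj n k → Pre_is_subgraph_py tree_edges graph_adj n k → Spec_is_subgraph_py tree_edges graph_adj n k (is_subgraph_py tree_edges graph_adj n k)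

-- ===== LEMMAS AND PROOFS =====

-- backtrack's loop entered at candidate v (the counter is determined by v)
def pvScanA (tadj : PySem.Dict Int (List Int)) (gadj : List (Int × List Int)) (n k : Int)
    (fuel : Nat) (idx v : Int) (m : List Int) (used : List Bool) : Bool :=
  pvScanGo gadj (tadj.getD idx []) n
    (fun m' used' => pvBtA tadj gadj n k fuel (idx + 1) m' used') idx (n - v).toNat v m used

-- getD/set toolbox ------------------------------------------------------------
lemma pv_getD_nonneg {α : Type} (xs : List α) (i : Int) (d : α) (h : 0 ≤ i) :
    PySem.List.pyGetD xs i d = xs.getD i.toNat d := by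
  have : i = ((i.toNat : Nat) : Int) := by omega
  rw [this, PySem.List.pyGetD_natCast, Int.toNat_natCast]

lemma pv_setD_nonneg {α : Type} (xs : List α) (i : Int) (x : α) (h : 0 ≤ i) :
    PySem.List.pySetD xs i x = xs.set i.toNat x := by
  have hi : i = ((i.toNat : Nat) : Int) := by omega
  rw [hi, PySem.List.pySetD_natCast, Int.toNat_natCast]

lemma pv_getD_set_ne {α : Type} (xs : List α) (i j : Nat) (x d : α) (h : i ≠ j) :
    (xs.set i x).getD j d = xs.getD j d := by
  simp [List.getD_eq_getElem?_getD, h]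

lemma pv_getD_set_self {α : Type} (xs : List α) (i : Nat) (x d : α) (h : i < xs.length) :
    (xs.set i x).getD i d = x := by
  simp [List.getD_eq_getElem?_getD, h]

lemma pv_set_restore {α : Type} (xs : List α) (i : Nat) (x w : α) (h : xs.getD i w = w) :
    (xs.set i x).set i w = xs := by
  apply List.ext_getElem?
  intro j
  by_cases hj : i = j
  · subst hj
    by_cases hi : i < xs.length
    · rw [List.getD_eq_getElem?_getD, List.getElem?_eq_getElem hi] at h
      simp at h
      simp [hi, h]
    · simp [hi]
  · simp [hj]

-- the two inner validity tests agree ------------------------------------------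
lemma pvCheckA_eq_validB (gadj : List (Int × List Int)) (m : List Int) (v : Int) :
    ∀ nbs : List Int, pvCheckA gadj m v nbs = pvValidB gadj m v nbs := by
  intro nbs
  induction nbs with
  | nil => simp [pvCheckA, pvValidB]
  | cons nb rest ih =>
    simp only [pvCheckA, pvValidB, List.all_cons] at *
    rw [ih]
    by_cases hm : PySem.List.pyGetD m nb 0 = -1
    · simp [hm]
    · by_cases hc : PySem.List.pyGetD m nb 0 ∈ pvAdjGet gadj v
      · simp [hm, hc]
      · simp [hm, hc]

-- A-side evaluation of a B-machine state --------------------------------------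
-- pvContA l m used pos = the final answer A's search produces from the point where
-- level l is about to try candidate pos[l], levels < l hold the current partial map,
-- and the levels below continue at their saved positions pos[j] (j < l).
def pvContA (tadj : PySem.Dict Int (List Int)) (gadj : List (Int × List Int)) (n k : Int) :
    Nat → List Int → List Bool → List Int → Bool
  | 0, m, used, pos =>
      if ((0:Nat) : Int) == k then true
      else if pvScanA tadj gadj n k (k.toNat - 1) ((0:Nat) : Int)
          (PySem.List.pyGetD pos ((0:Nat) : Int) 0) m used then true
      else false
  | l + 1, m, used, pos =>
      if ((l + 1 : Nat) : Int) == k then true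
      else if pvScanA tadj gadj n k (k.toNat - 1 - (l + 1)) ((l + 1 : Nat) : Int)
          (PySem.List.pyGetD pos ((l + 1 : Nat) : Int) 0) m used then true
      else pvContA tadj gadj n k l (PySem.List.pySetD m ((l : Nat) : Int) (-1))
          (PySem.List.pySetD used (PySem.List.pyGetD m ((l : Nat) : Int) 0) false) pos

-- the backtracking continuation below level l (what runs if level l's scan fails)
def pvPop (tadj : PySem.Dict Int (List Int)) (gadj : List (Int × List Int)) (n k : Int) :
    Nat → List Int → List Bool → List Int → Bool
  | 0, _, _, _ => false
  | l' + 1, m, used, pos =>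
    pvContA tadj gadj n k l' (PySem.List.pySetD m ((l' : Nat) : Int) (-1))
      (PySem.List.pySetD used (PySem.List.pyGetD m ((l' : Nat) : Int) 0) false) pos

lemma pvContA_eq (tadj : PySem.Dict Int (List Int)) (gadj : List (Int × List Int)) (n k : Int)
    (l : Nat) (m : List Int) (used : List Bool) (pos : List Int) :
    pvContA tadj gadj n k l m used pos =
      if ((l : Nat) : Int) == k then true
      else if pvScanA tadj gadj n k (k.toNat - 1 - l) ((l : Nat) : Int)
          (PySem.List.pyGetD pos ((l : Nat) : Int) 0) m used then true
      else pvPop tadj gadj n k l m used pos := by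
  cases l with
  | zero => simp only [pvContA, pvPop, Nat.sub_zero]
  | succ l' => simp only [pvContA, pvPop]

-- loop measure: number of machine steps is bounded by this weighted sum --------
def pvCoef (n k : Int) (pos : List Int) (j : Nat) : Nat :=
  (n + 2 - pos.getD j 0).toNat * (n.toNat + 3) ^ (k.toNat - j)

def pvMu (n k : Int) (pos : List Int) : Nat → Nat
  | 0 => pvCoef n k pos 0
  | l + 1 => pvMu n k pos l + pvCoef n k pos (l + 1)

-- state invariant of the B machine --------------------------------------------
def pvInv (n k : Int) (l : Nat) (m : List Int) (pos : List Int) : Prop :=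
  1 ≤ k ∧ k ≤ n ∧ (l : Int) ≤ k ∧ m.length = k.toNat ∧ pos.length = k.toNat ∧
  (∀ j : Nat, l ≤ j → j < k.toNat → m.getD j 0 = -1) ∧
  (∀ j : Nat, l < j → pos.getD j 0 = 0) ∧
  (∀ j : Nat, 0 ≤ pos.getD j 0 ∧ pos.getD j 0 ≤ n)

lemma pvContA_congr (tadj : PySem.Dict Int (List Int)) (gadj : List (Int × List Int)) (n k : Int) :
    ∀ (l : Nat) (m : List Int) (used : List Bool) (pos pos' : List Int),
    (∀ j : Nat, j ≤ l → pos.getD j 0 = pos'.getD j 0) →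
    pvContA tadj gadj n k l m used pos = pvContA tadj gadj n k l m used pos' := by
  intro l
  induction l with
  | zero =>
    intro m used pos pos' h
    simp only [pvContA, PySem.List.pyGetD_natCast]
    rw [h 0 le_rfl]
  | succ l ih =>
    intro m used pos pos' h
    simp only [pvContA, PySem.List.pyGetD_natCast]
    rw [h (l + 1) le_rfl, ih _ _ _ _ (fun j hj => h j (by omega))]

lemma pvPop_congr (tadj : PySem.Dict Int (List Int)) (gadj : List (Int × List Int)) (n k : Int)
    (l : Nat) (m : List Int) (used : List Bool) (pos pos' : List Int)
    (h : ∀ j : Nat, j < l → pos.getD j 0 = pos'.getD j 0) :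
    pvPop tadj gadj n k l m used pos = pvPop tadj gadj n k l m used pos' := by
  cases l with
  | zero => rfl
  | succ l' =>
    simp only [pvPop]
    exact pvContA_congr tadj gadj n k l' _ _ _ _ (fun j hj => h j (by omega))

lemma pvMu_congr (n k : Int) :
    ∀ (l : Nat) (pos pos' : List Int),
    (∀ j : Nat, j ≤ l → pos.getD j 0 = pos'.getD j 0) →
    pvMu n k pos l = pvMu n k pos' l := by
  intro l
  induction l with
  | zero =>
    intro pos pos' h
    simp only [pvMu, pvCoef]
    rw [h 0 le_rfl]
  | succ l ih =>
    intro pos pos' h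
    simp only [pvMu, pvCoef]
    rw [h (l + 1) le_rfl, ih _ _ (fun j hj => h j (by omega))]

lemma pvMu_set_high (n k : Int) (l i : Nat) (pos : List Int) (x : Int) (h : l < i) :
    pvMu n k (pos.set i x) l = pvMu n k pos l :=
  pvMu_congr n k l _ _ (fun j hj => pv_getD_set_ne pos i j x 0 (by omega))

lemma pvMu_set (n k : Int) (pos : List Int) (l : Nat) (v : Int)
    (hg : pos.getD l 0 = v) (hlen : l < pos.length) (_h0 : 0 ≤ v) (hv : v ≤ n) :
    pvMu n k (pos.set l (v + 1)) l + (n.toNat + 3) ^ (k.toNat - l) = pvMu n k pos l := by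
  have h1 : (n + 2 - v).toNat = (n + 2 - (v + 1)).toNat + 1 := by omega
  cases l with
  | zero =>
    simp only [pvMu, pvCoef]
    rw [pv_getD_set_self _ _ _ _ hlen, hg, h1]
    ring
  | succ l =>
    simp only [pvMu, pvCoef]
    rw [pvMu_set_high n k l (l + 1) pos (v + 1) (by omega),
      pv_getD_set_self _ _ _ _ hlen, hg, h1]
    ring

lemma pv_coef_pos (n k : Int) (pos : List Int) (l : Nat) (_hn : 0 ≤ n)
    (hv : pos.getD l 0 ≤ n) : 1 ≤ pvCoef n k pos l := by
  unfold pvCoef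
  have h1 : 1 ≤ (n + 2 - pos.getD l 0).toNat := by omega
  have h2 : 1 ≤ (n.toNat + 3) ^ (k.toNat - l) := Nat.one_le_pow _ _ (by omega)
  calc 1 = 1 * 1 := rfl
    _ ≤ _ := Nat.mul_le_mul h1 h2

-- the main simulation: the B machine computes pvContA of its state -------------
-- helper: getD's default is irrelevant in range
lemma pv_getD_default {α : Type} (xs : List α) (i : Nat) (d d' : α) (h : i < xs.length) :
    xs.getD i d = xs.getD i d' := by
  rw [List.getD_eq_getElem?_getD, List.getD_eq_getElem?_getD, List.getElem?_eq_getElem h]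
  rfl

-- helper: pvContA only looks at pos[l] through the scan start, so a state whose
-- scan at level l starts at x instead of pos[l] with the same outcome is equivalent
lemma pvContA_resume (tadj : PySem.Dict Int (List Int)) (gadj : List (Int × List Int)) (n k : Int)
    (l : Nat) (m : List Int) (used : List Bool) (pos : List Int) (x : Int)
    (hlen : l < pos.length)
    (hscan : pvScanA tadj gadj n k (k.toNat - 1 - l) (l : Int) (pos.getD l 0) m used
           = pvScanA tadj gadj n k (k.toNat - 1 - l) (l : Int) x m used) :
    pvContA tadj gadj n k l m used pos = pvContA tadj gadj n k l m used (pos.set l x) := by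
  cases l with
  | zero =>
    simp only [pvContA, PySem.List.pyGetD_zero, Nat.cast_zero]
    rw [pv_getD_set_self pos 0 x 0 hlen]
    simp only [Nat.cast_zero, Nat.sub_zero] at hscan
    rw [hscan]
  | succ l' =>
    simp only [pvContA, PySem.List.pyGetD_natCast]
    rw [pv_getD_set_self pos (l' + 1) x 0 hlen, hscan]
    rw [pvContA_congr tadj gadj n k l' _ _ pos (pos.set (l' + 1) x)
      (fun j hj => (pv_getD_set_ne pos (l' + 1) j x 0 (by omega)).symm)]

lemma pvScanA_eq (tadj : PySem.Dict Int (List Int)) (gadj : List (Int × List Int)) (n k : Int)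
    (fuel : Nat) (idx v : Int) (m : List Int) (used : List Bool) :
    pvScanA tadj gadj n k fuel idx v m used =
      if n ≤ v then false
      else if PySem.List.pyGetD used v false then pvScanA tadj gadj n k fuel idx (v + 1) m used
      else if pvCheckA gadj m v (tadj.getD idx []) then
        if pvBtA tadj gadj n k fuel (idx + 1) (PySem.List.pySetD m idx v)
            (PySem.List.pySetD used v true) = true then true
        else pvScanA tadj gadj n k fuel idx (v + 1) m used
      else pvScanA tadj gadj n k fuel idx (v + 1) m used := by
  by_cases hnv : n ≤ v
  · rw [if_pos hnv]
    unfold pvScanA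
    rw [show (n - v).toNat = 0 from by omega]
    rfl
  · rw [if_neg hnv]
    unfold pvScanA
    rw [show (n - v).toNat = (n - (v + 1)).toNat + 1 from by omega]
    rw [pvScanGo, if_neg hnv]
lemma pvBtA_succ (tadj : PySem.Dict Int (List Int)) (gadj : List (Int × List Int)) (n k : Int)
    (f : Nat) (idx : Int) (m : List Int) (used : List Bool) :
    pvBtA tadj gadj n k (f + 1) idx m used =
      if idx == k then true else pvScanA tadj gadj n k f idx 0 m used := by
  rw [pvBtA]
  unfold pvScanA
  rw [show n - 0 = n from sub_zero n]

lemma pvBtA_at_k (tadj : PySem.Dict Int (List Int)) (gadj : List (Int × List Int)) (n k : Int)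
    (fuel : Nat) (idx : Int) (m : List Int) (used : List Bool) (h : idx = k) :
    pvBtA tadj gadj n k fuel idx m used = true := by
  cases fuel <;> (rw [pvBtA]; simp [h])

lemma pvMain (tadj : PySem.Dict Int (List Int)) (gadj : List (Int × List Int)) (n k : Int) :
    ∀ (fuel : Nat) (idx : Int) (m : List Int) (used : List Bool) (pos : List Int),
    (idx = -1 ∨ (0 ≤ idx ∧ pvInv n k idx.toNat m pos)) →
    (if idx < 0 then 0 else pvMu n k pos idx.toNat) < fuel →
    pvLoopB tadj gadj n k fuel idx m used pos =
      (if idx < 0 then false else pvContA tadj gadj n k idx.toNat m used pos) := by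
  intro fuel
  induction fuel with
  | zero =>
    intro idx m used pos _ hmu
    exact absurd hmu (Nat.not_lt_zero _)
  | succ f ih =>
    intro idx m used pos hinv hmu
    rcases hinv with rfl | ⟨hge, hinv⟩
    · rw [pvLoopB]
      norm_num
    · obtain ⟨l, rfl⟩ : ∃ l : Nat, idx = (l : Int) := ⟨idx.toNat, by omega⟩
      simp only [Int.toNat_natCast] at hinv hmu ⊢
      obtain ⟨hk1, hkn, hlk, hlm, hlp, hm, hp0, hpb⟩ := hinv
      have hn1 : (1:Int) ≤ n := le_trans hk1 hkn
      have hl0 : ¬ ((l : Int) < 0) := by omega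
      rw [if_neg hl0] at hmu ⊢
      rw [pvLoopB, if_neg hl0]
      by_cases hlK : (l : Int) = k
      · -- idx == k : both sides are true
        rw [if_pos (by simp [hlK])]
        cases l with
        | zero => simp [pvContA, ← hlK]
        | succ l' => simp [pvContA, ← hlK]
      · rw [if_neg (by simp [hlK])]
        have hlltk : l < k.toNat := by omega
        simp only [PySem.List.pyGetD_natCast, PySem.List.pySetD_natCast]
        by_cases hvn : n ≤ pos.getD l 0
        · -- pop branch
          rw [if_pos hvn]
          cases l with
          | zero =>
            simp only [Nat.cast_zero] at hlK hmu ⊢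
            rw [show (0:Int) - 1 = (-1:Int) by norm_num]
            rw [if_pos (by norm_num)]
            have hmu1 : 1 ≤ pvMu n k pos 0 := by
              simpa only [pvMu] using pv_coef_pos n k pos 0 (by omega) (hpb 0).2
            rw [ih (-1) m used (pos.set 0 0) (Or.inl rfl)
              (by rw [if_pos (by norm_num)]; omega)]
            rw [if_pos (by norm_num)]
            have hs : pvScanA tadj gadj n k (k.toNat - 1) 0 (pos.getD 0 0) m used = false := by
              rw [pvScanA_eq, if_pos hvn]
            simp only [pvContA, PySem.List.pyGetD_zero, Nat.cast_zero, hs]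
            simp [hlK]
          | succ l' =>
            have hc1 : ((l' + 1 : Nat) : Int) - 1 = ((l' : Nat) : Int) := by push_cast; ring
            rw [hc1]
            rw [if_neg (by omega)]
            simp only [PySem.List.pySetD_natCast, PySem.List.pyGetD_natCast]
            have hlen1 : l' + 1 < pos.length := by omega
            have hlenm : l' < m.length := by omega
            have hinv' : pvInv n k l' (m.set l' (-1)) (pos.set (l' + 1) 0) := by
              refine ⟨hk1, hkn, by omega, by simp [hlm], by simp [hlp], ?_, ?_, ?_⟩
              · intro j hj1 hj2
                by_cases hj : j = l'
                · subst hj; rw [pv_getD_set_self _ _ _ _ hlenm]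
                · rw [pv_getD_set_ne _ _ _ _ _ (fun h => hj h.symm)]
                  exact hm j (by omega) hj2
              · intro j hj
                by_cases hj2 : j = l' + 1
                · subst hj2; rw [pv_getD_set_self _ _ _ _ hlen1]
                · rw [pv_getD_set_ne _ _ _ _ _ (fun h => hj2 h.symm)]
                  exact hp0 j (by omega)
              · intro j
                by_cases hj2 : j = l' + 1
                · subst hj2; rw [pv_getD_set_self _ _ _ _ hlen1]
                  exact ⟨le_rfl, by omega⟩
                · rw [pv_getD_set_ne _ _ _ _ _ (fun h => hj2 h.symm)]
                  exact hpb j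
            have hmu' : (if ((l' : Nat) : Int) < 0 then 0
                else pvMu n k (pos.set (l' + 1) 0) ((l' : Nat) : Int).toNat) < f := by
              rw [if_neg (by omega), Int.toNat_natCast,
                pvMu_set_high n k l' (l' + 1) pos 0 (by omega)]
              simp only [pvMu] at hmu
              have hc := pv_coef_pos n k pos (l' + 1) (by omega) (hpb (l' + 1)).2
              omega
            rw [ih ((l' : Nat) : Int) _ _ _ (Or.inr ⟨by omega, by rwa [Int.toNat_natCast]⟩) hmu']
            rw [if_neg (by omega), Int.toNat_natCast]
            have hs : pvScanA tadj gadj n k (k.toNat - 1 - (l' + 1)) ((l' + 1 : Nat) : Int)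
                (pos.getD (l' + 1) 0) m used = false := by
              rw [pvScanA_eq, if_pos hvn]
            conv_rhs => rw [pvContA]
            simp only [PySem.List.pyGetD_natCast, PySem.List.pySetD_natCast, hs]
            rw [if_neg (by simpa using hlK), if_neg (by simp)]
            exact pvContA_congr tadj gadj n k l' _ _ _ _
              (fun j hj => pv_getD_set_ne pos (l' + 1) j 0 0 (by omega))
        · -- scan branch
          rw [if_neg hvn]
          have hv0 : 0 ≤ pos.getD l 0 := (hpb l).1
          have hvlt : pos.getD l 0 < n := by omega
          set v := pos.getD l 0 with hveq
          have hlenp : l < pos.length := by omega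
          have hlenm : l < m.length := by omega
          have hmuset := pvMu_set n k pos l v hveq.symm hlenp hv0 (le_of_lt hvlt)
          have hW1 : 1 ≤ (n.toNat + 3) ^ (k.toNat - l) := Nat.one_le_pow _ _ (by omega)
          have hinvp : pvInv n k l m (pos.set l (v + 1)) := by
            refine ⟨hk1, hkn, hlk, hlm, by simp [hlp], hm, ?_, ?_⟩
            · intro j hj
              rw [pv_getD_set_ne _ _ _ _ _ (by omega)]
              exact hp0 j hj
            · intro j
              by_cases hj : j = l
              · subst hj; rw [pv_getD_set_self _ _ _ _ hlenp]
                exact ⟨by omega, by omega⟩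
              · rw [pv_getD_set_ne _ _ _ _ _ (fun h => hj h.symm)]
                exact hpb j
          have hmup : (if ((l : Nat) : Int) < 0 then 0
              else pvMu n k (pos.set l (v + 1)) ((l : Nat) : Int).toNat) < f := by
            rw [if_neg hl0, Int.toNat_natCast]
            omega
          by_cases hus : PySem.List.pyGetD used v false = true
          · -- candidate already used: advance the candidate pointer
            rw [if_pos hus]
            rw [ih ((l : Nat) : Int) m used (pos.set l (v + 1))
              (Or.inr ⟨by omega, by rwa [Int.toNat_natCast]⟩) hmup]
            rw [if_neg hl0, Int.toNat_natCast]
            refine (pvContA_resume tadj gadj n k l m used pos (v + 1) hlenp ?_).symm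
            conv_lhs => rw [pvScanA_eq]
            rw [← hveq, if_neg hvn, if_pos hus]
          · by_cases hvalid : pvValidB gadj m v (tadj.getD ((l : Nat) : Int) []) = true
            · -- extend the mapping and go one level deeper
              rw [if_neg hus, if_pos hvalid]
              have hcast : ((l : Nat) : Int) + 1 = ((l + 1 : Nat) : Int) := by push_cast; ring
              rw [hcast]
              have hinv2 : pvInv n k (l + 1) (m.set l v) (pos.set l (v + 1)) := by
                refine ⟨hk1, hkn, by omega, by simp [hlm], by simp [hlp], ?_, ?_, ?_⟩
                · intro j hj1 hj2
                  rw [pv_getD_set_ne _ _ _ _ _ (by omega)]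
                  exact hm j (by omega) hj2
                · intro j hj
                  rw [pv_getD_set_ne _ _ _ _ _ (by omega)]
                  exact hp0 j (by omega)
                · intro j
                  by_cases hj : j = l
                  · subst hj; rw [pv_getD_set_self _ _ _ _ hlenp]
                    exact ⟨by omega, by omega⟩
                  · rw [pv_getD_set_ne _ _ _ _ _ (fun h => hj h.symm)]
                    exact hpb j
              have hmu2 : (if ((l + 1 : Nat) : Int) < 0 then 0
                  else pvMu n k (pos.set l (v + 1)) ((l + 1 : Nat) : Int).toNat) < f := by
                rw [if_neg (by omega), Int.toNat_natCast]
                simp only [pvMu, pvCoef]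
                rw [pv_getD_set_ne _ _ _ _ _ (by omega), hp0 (l + 1) (by omega)]
                have hcoeflt : (n + 2 - 0).toNat * (n.toNat + 3) ^ (k.toNat - (l + 1))
                    < (n.toNat + 3) ^ (k.toNat - l) := by
                  rw [show k.toNat - l = (k.toNat - (l + 1)) + 1 from by omega, pow_succ']
                  exact mul_lt_mul_of_pos_right (by omega) (pow_pos (by omega) _)
                omega
              rw [ih ((l + 1 : Nat) : Int) (m.set l v) (PySem.List.pySetD used v true)
                (pos.set l (v + 1)) (Or.inr ⟨by omega, by rwa [Int.toNat_natCast]⟩) hmu2]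
              rw [if_neg (by omega), Int.toNat_natCast]
              -- both sides, unfolded one level
              have hrest : PySem.List.pySetD (PySem.List.pySetD used v true) v false = used := by
                rw [pv_setD_nonneg used v true hv0, pv_setD_nonneg _ v false hv0]
                refine pv_set_restore used v.toNat true false ?_
                have := pv_getD_nonneg used v false hv0
                rw [this] at hus
                exact Bool.not_eq_true _ ▸ (by simpa using hus)
              have hmrest : (m.set l v).set l (-1) = m := by
                refine pv_set_restore m l v (-1) ?_
                rw [pv_getD_default m l (-1) 0 hlenm]
                exact hm l le_rfl hlltk
              have hSv : pvScanA tadj gadj n k (k.toNat - 1 - l) ((l : Nat) : Int) v m used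
                  = if pvBtA tadj gadj n k (k.toNat - 1 - l) (((l : Nat) : Int) + 1)
                        (m.set l v) (PySem.List.pySetD used v true) = true then true
                    else pvScanA tadj gadj n k (k.toNat - 1 - l) ((l : Nat) : Int) (v + 1) m used := by
                conv_lhs => rw [pvScanA_eq]
                rw [if_neg hvn, if_neg hus, pvCheckA_eq_validB, if_pos hvalid]
                simp only [PySem.List.pySetD_natCast]
              rw [pvContA_eq]
              rw [pvContA_eq tadj gadj n k l m used pos]
              simp only [PySem.List.pyGetD_natCast]
              rw [pv_getD_set_ne pos l (l + 1) (v + 1) 0 (by omega), hp0 (l + 1) (by omega),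
                ← hveq]
              rw [if_neg (show ¬((((l : Nat) : Int) == k) = true) by simpa using hlK)]
              rw [hSv, ← hcast]
              by_cases hk2 : ((l : Nat) : Int) + 1 = k
              · rw [if_pos (by simpa using hk2)]
                rw [pvBtA_at_k tadj gadj n k _ _ _ _ hk2]
                simp
              · rw [if_neg (by simpa using hk2)]
                have hbt : pvBtA tadj gadj n k (k.toNat - 1 - l) (((l : Nat) : Int) + 1)
                      (m.set l v) (PySem.List.pySetD used v true)
                    = pvScanA tadj gadj n k (k.toNat - 1 - (l + 1)) (((l : Nat) : Int) + 1) 0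
                      (m.set l v) (PySem.List.pySetD used v true) := by
                  rw [show k.toNat - 1 - l = (k.toNat - 1 - (l + 1)) + 1 from by omega,
                    pvBtA_succ, if_neg (by simpa using hk2)]
                rw [hbt]
                have hpopfold : pvPop tadj gadj n k (l + 1) (m.set l v)
                    (PySem.List.pySetD used v true) (pos.set l (v + 1))
                    = pvContA tadj gadj n k l m used (pos.set l (v + 1)) := by
                  simp only [pvPop, PySem.List.pySetD_natCast, PySem.List.pyGetD_natCast]
                  rw [pv_getD_set_self m l v 0 hlenm, hmrest, hrest]
                rw [hpopfold]
                have hpop : pvPop tadj gadj n k l m used (pos.set l (v + 1))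
                    = pvPop tadj gadj n k l m used pos :=
                  pvPop_congr tadj gadj n k l m used _ _
                    (fun j hj => pv_getD_set_ne pos l j (v + 1) 0 (by omega))
                have hS1 : pvContA tadj gadj n k l m used (pos.set l (v + 1))
                    = if pvScanA tadj gadj n k (k.toNat - 1 - l) ((l : Nat) : Int) (v + 1) m used
                        = true then true
                      else pvPop tadj gadj n k l m used pos := by
                  rw [pvContA_eq, if_neg (show ¬((((l : Nat) : Int) == k) = true) by simpa using hlK)]
                  simp only [PySem.List.pyGetD_natCast]
                  rw [pv_getD_set_self pos l (v + 1) 0 hlenp, hpop]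
                rw [hS1]
                cases hx : pvScanA tadj gadj n k (k.toNat - 1 - (l + 1)) (((l : Nat) : Int) + 1) 0
                    (m.set l v) (PySem.List.pySetD used v true) <;>
                  cases hy : pvScanA tadj gadj n k (k.toNat - 1 - l) ((l : Nat) : Int) (v + 1)
                    m used <;> simp
            · -- candidate rejected by the consistency test
              rw [if_neg hus, if_neg hvalid]
              rw [ih ((l : Nat) : Int) m used (pos.set l (v + 1))
                (Or.inr ⟨by omega, by rwa [Int.toNat_natCast]⟩) hmup]
              rw [if_neg hl0, Int.toNat_natCast]
              refine (pvContA_resume tadj gadj n k l m used pos (v + 1) hlenp ?_).symm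
              conv_lhs => rw [pvScanA_eq]
              rw [← hveq, if_neg hvn, if_neg hus, pvCheckA_eq_validB, if_neg hvalid]

lemma pv_getD_replicate {α : Type} (nn : Nat) (a d : α) (j : Nat) :
    (List.replicate nn a).getD j d = if j < nn then a else d := by
  rw [List.getD_eq_getElem?_getD, List.getElem?_replicate]
  split <;> rfl

-- ===== VERDICT (by name: the statement is the Claim_ definition above) =====
theorem is_subgraph_py_spec : Claim_equal_is_subgraph_py := by
  intro te ga n k hdom hpre
  unfold Spec_is_subgraph_py is_subgraph_py is_subgraph_py_alt
  by_cases h1 : k > n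
  · rw [if_pos h1, if_pos h1]
  · rw [if_neg h1, if_neg h1]
    by_cases h2 : te.isEmpty
    · rw [if_pos h2, if_pos h2]
    · rw [if_neg h2, if_neg h2]
      have hne : te ≠ [] := by simpa [List.isEmpty_iff] using h2
      obtain ⟨p, hp⟩ : ∃ p, p ∈ te := List.exists_mem_of_ne_nil te hne
      have hbp := hpre ⟨le_of_not_gt h1, hne⟩ p hp
      have hk1 : 1 ≤ k := by omega
      have hn1 : 1 ≤ n := by omega
      have hinv0 : pvInv n k 0 (List.replicate k.toNat (-1))
          (List.replicate k.toNat (0 : Int)) := by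
        refine ⟨hk1, le_of_not_gt h1, by simp; omega, List.length_replicate,
          List.length_replicate, ?_, ?_, ?_⟩
        · intro j _ hj2
          rw [pv_getD_replicate, if_pos hj2]
        · intro j _
          rw [pv_getD_replicate]
          split <;> rfl
        · intro j
          rw [pv_getD_replicate]
          split <;> exact ⟨le_rfl, by omega⟩
      have hmu0 : (if (0 : Int) < 0 then 0
          else pvMu n k (List.replicate k.toNat (0 : Int)) (0 : Int).toNat)
          < (n.toNat + 3) ^ (k.toNat + 2) := by
        rw [if_neg (by norm_num)]
        show pvMu n k (List.replicate k.toNat (0 : Int)) 0 < _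
        simp only [pvMu, pvCoef]
        rw [pv_getD_replicate, Nat.sub_zero]
        have hco : (n + 2 - if 0 < k.toNat then (0:Int) else 0).toNat = n.toNat + 2 := by
          split <;> omega
        rw [hco, show (n.toNat + 3) ^ (k.toNat + 2)
            = (n.toNat + 3) ^ 2 * (n.toNat + 3) ^ k.toNat from by ring]
        refine mul_lt_mul_of_pos_right ?_ (pow_pos (by omega) _)
        calc n.toNat + 2 < n.toNat + 3 := by omega
          _ ≤ (n.toNat + 3) ^ 2 := Nat.le_self_pow (by omega) _
      rw [pvMain (pvBuildTreeAdj te k) ga n k _ 0 (List.replicate k.toNat (-1))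
        (List.replicate n.toNat false) (List.replicate k.toNat (0 : Int))
        (Or.inr ⟨le_rfl, hinv0⟩) hmu0]
      rw [if_neg (by norm_num)]
      rw [show (0 : Int).toNat = 0 from rfl]
      rw [pvContA_eq, if_neg (by simp; omega)]
      simp only [Nat.cast_zero, PySem.List.pyGetD_zero, Nat.sub_zero]
      rw [pv_getD_replicate]
      rw [show (if 0 < k.toNat then (0:Int) else 0) = 0 from by split <;> rfl]
      rw [show k.toNat = (k.toNat - 1) + 1 from by omega, pvBtA_succ, if_neg (by simp; omega)]
      simp only [pvPop]
      cases hsc : pvScanA (pvBuildTreeAdj te k) ga n k (k.toNat - 1) 0 0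
          (List.replicate k.toNat (-1)) (List.replicate n.toNat false) <;> simp
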